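-- pv_equiv track=rewrite | github.com/BhavMohan/BLAST | analyze_blast.py | best_alignment_to_reference
-- ===== SOURCE A (Python) =====
-- from typing import Dict, List, Optional, Tuple
--
-- def score_alignment_at(ref: str, frag: str, start_idx: int) -> int:
--     """Score alignment placing frag starting at ref[start_idx]. No gaps. +1 match, 0 for 'X' in frag, -1 mismatch."""
--     score = 0
--     for i, aa in enumerate(frag):
--         ref_idx = start_idx + i
--         if ref_idx < 0 or ref_idx >= len(ref):
--             return -10_000  # invalid placement
--         if aa == 'X' or aa == 'x':
--             continue
--         score += 1 if aa == ref[ref_idx] else -1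
--     return score
--
-- def best_alignment_to_reference(ref: str, frag: str) -> Tuple[int, int]:
--     """Return (best_start_index_in_ref, best_score). No gaps, slide across reference."""
--     best_start = 0
--     best_score = -10_000
--     for start in range(0, len(ref) - len(frag) + 1):
--         s = score_alignment_at(ref, frag, start)
--         if s > best_score:
--             best_score = s
--             best_start = start
--     return best_start, best_score
-- ===== SOURCE B (Python) =====
-- def best_alignment_to_reference(ref: str, frag: str):
--     """Per-character scatter: index the reference once by residue; for each non-X
--     fragment position, binary-search the (sorted) occurrence list of its residue and
--     walk only the occurrences that fall inside the sliding window, adding each into a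
--     per-start match counter; score(start) = 2*matches - (# non-X residues).  Same
--     result as the per-start rescan by a different route: only actual in-window
--     character co-occurrences are ever touched."""
--     n, m = len(ref), len(frag)
--     width = n - m + 1
--     occ = {}
--     for j, c in enumerate(ref):
--         occ.setdefault(c, []).append(j)
--     k = 0
--     match = [0] * max(width, 0)
--     for i, aa in enumerate(frag):
--         if aa == 'X' or aa == 'x':
--             continue
--         k += 1
--         L = occ.get(aa, [])
--         lo, hi = 0, len(L)
--         while lo < hi:                     # bisect-left for i: first occurrence >= i
--             mid = (lo + hi) // 2
--             if L[mid] < i: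
--                 lo = mid + 1
--             else:
--                 hi = mid
--         while lo < len(L) and L[lo] - i < width:
--             match[L[lo] - i] += 1
--             lo += 1
--     best_start, best_score = 0, -10_000
--     for s in range(width):
--         sc = 2 * match[s] - k
--         if sc > best_score:
--             best_start, best_score = s, sc
--     return best_start, best_score
-- ===== Notes on version B (the rewrite author's own statement) =====
-- stated objective: alternative
-- what changed: Instead of rescoring every start position by scanning the whole fragment (nested sliding scan with a bounds-check sentinel), B indexes the reference once by character, and for each non-X fragment position binary-searches that character's sorted occurrence list and walks only the occurrences inside the sliding window, accumulating per-start match counters; each score is then the closed form 2*matches - (non-X fragment length) before the same first-strict-max selection.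
import Mathlib
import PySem

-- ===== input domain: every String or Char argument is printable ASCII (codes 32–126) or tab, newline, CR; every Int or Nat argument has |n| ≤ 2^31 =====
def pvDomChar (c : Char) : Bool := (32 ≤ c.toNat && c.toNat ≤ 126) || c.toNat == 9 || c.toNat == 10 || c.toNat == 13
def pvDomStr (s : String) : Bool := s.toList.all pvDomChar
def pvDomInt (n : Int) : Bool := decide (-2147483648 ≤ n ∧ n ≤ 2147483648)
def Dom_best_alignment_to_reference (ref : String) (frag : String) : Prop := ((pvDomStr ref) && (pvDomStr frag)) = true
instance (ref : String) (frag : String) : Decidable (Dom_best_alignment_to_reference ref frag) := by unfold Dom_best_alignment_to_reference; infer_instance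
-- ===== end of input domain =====

-- B replaces A's per-start rescan of the fragment by a character-indexed scatter: the
-- reference is indexed once by character, each non-X fragment position walks (after a
-- binary search) only the in-window occurrences of its character into per-start match
-- counters, and score = 2*matches - (non-X length); an alternative algorithm, not claimed faster.


-- ===== PORT A =====
-- the 'for i, aa in enumerate(frag)' loop of score_alignment_at, with its early return
-- -10000 on an out-of-range placement ('ref[ref_idx]' is only read inside the range
-- guard, so the pyGetD default ' ' is never the value used)
def pvScoreLoopA (refL : List Char) (start : Int) : List (Int × Char) → Int → Int
  | [], score => score
  | (i, aa) :: rest, score =>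
    let ref_idx := start + i
    if ref_idx < 0 ∨ (refL.length : Int) ≤ ref_idx then -10000
    else if aa = 'X' ∨ aa = 'x' then pvScoreLoopA refL start rest score
    else pvScoreLoopA refL start rest
      (score + if aa = PySem.List.pyGetD refL ref_idx ' ' then 1 else -1)

def score_alignment_at (ref : String) (frag : String) (start_idx : Int) : Int :=
  pvScoreLoopA ref.toList start_idx (PySem.List.enumerate frag.toList 0) 0

def best_alignment_to_reference (ref : String) (frag : String) : List Int :=
  let p := (PySem.List.pyRange 0 (PySem.Str.len ref - PySem.Str.len frag + 1) 1).foldl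
    (fun (st : Int × Int) start =>
      let s := score_alignment_at ref frag start
      if s > st.2 then (start, s) else st) (0, -10000)
  [p.1, p.2]

-- ===== PORT B =====
-- occ: dict mapping each reference character to the list of its positions
-- ('occ.setdefault(c, []).append(j)', i.e. occ[c] = occ.get(c, []) + [j] in place)
def pvOcc (refL : List Char) : PySem.Dict Char (List Int) :=
  (PySem.List.enumerate refL 0).foldl
    (fun d jc => d.modify jc.2 [] (fun l => l ++ [jc.1])) PySem.Dict.empty

-- 'while lo < hi: mid = (lo + hi) // 2; ...' bisect-left loop: first index with L[index] >= x
def pvBisect (L : List Int) (x : Int) (lo hi : Int) : Int :=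
  if h : lo < hi then
    let mid := PySem.Int.floordiv (lo + hi) 2
    if PySem.List.pyGetD L mid 0 < x then pvBisect L x (mid + 1) hi
    else pvBisect L x lo mid
  else lo
termination_by (hi - lo).toNat
decreasing_by
  all_goals have hb := PySem.Int.floordiv_two_mid_bounds (le_of_lt h)
  all_goals have hlt : PySem.Int.floordiv (lo + hi) 2 < hi := by rw [PySem.Int.floordiv_lt_iff_lt_mul (by omega)]; omega
  all_goals omega

-- 'while lo < len(L) and L[lo] - i < width: match[L[lo] - i] += 1; lo += 1'

-- 'while lo < len(L) and L[lo] - i < width: match[L[lo] - i] += 1; lo += 1'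
-- (the in-window occurrence walk; 'match[L[lo] - i]' is in range whenever executed,
-- since lo comes from the bisect loop so L[lo] >= i, and match has length max(width, 0))
def pvScan (width i : Int) (L : List Int) (lo : Int) (mt : List Int) : List Int :=
  if h : lo < (L.length : Int) ∧ PySem.List.pyGetD L lo 0 - i < width then
    pvScan width i L (lo + 1)
      (PySem.List.pySetD mt (PySem.List.pyGetD L lo 0 - i)
        (PySem.List.pyGetD mt (PySem.List.pyGetD L lo 0 - i) 0 + 1))
  else mt
termination_by ((L.length : Int) - lo).toNat
decreasing_by omega

-- outer "for i, aa in enumerate(frag)" loop carrying the state (k, match)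
def pvAccum (width : Int) (occ : PySem.Dict Char (List Int)) (l : List (Int × Char))
    (st : Int × List Int) : Int × List Int :=
  l.foldl (fun st p =>
    if p.2 = 'X' ∨ p.2 = 'x' then st
    else
      let L := occ.getD p.2 []
      let lo := pvBisect L p.1 0 (PySem.List.len L)
      (st.1 + 1, pvScan width p.1 L lo st.2)) st

def best_alignment_to_reference_alt (ref : String) (frag : String) : List Int :=
  let width : Int := PySem.Str.len ref - PySem.Str.len frag + 1
  let occ := pvOcc ref.toList
  let km := pvAccum width occ (PySem.List.enumerate frag.toList 0)
    (0, List.replicate (max width 0).toNat 0)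
  let p := (PySem.List.pyRange 0 width 1).foldl
    (fun (st : Int × Int) s =>
      let sc := 2 * PySem.List.pyGetD km.2 s 0 - km.1
      if sc > st.2 then (s, sc) else st) (0, -10000)
  [p.1, p.2]

-- ===== PRECONDITION & SPEC =====
def Spec_best_alignment_to_reference (ref : String) (frag : String) (out : List Int) : Prop := out = best_alignment_to_reference_alt ref frag
instance (ref : String) (frag : String) (out : List Int) : Decidable (Spec_best_alignment_to_reference ref frag out) := by unfold Spec_best_alignment_to_reference; infer_instance

-- ===== CLAIM (what is proved, stated in full; the proofs are below) =====
def Claim_equal_best_alignment_to_reference : Prop := ∀ (ref : String) (frag : String), Dom_best_alignment_to_reference ref frag → Spec_best_alignment_to_reference ref frag (best_alignment_to_reference ref frag)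

-- ===== LEMMAS AND PROOFS =====

-- k: the number of non-X fragment positions; matchCnt s: the number of non-X fragment
-- positions whose character equals the reference character at offset s
def pvKOf (l : List (Int × Char)) : Int :=
  (l.map (fun p => if ¬ (p.2 = 'X' ∨ p.2 = 'x') then (1 : Int) else 0)).sum

def pvMatchCnt (refL : List Char) (s : Int) (l : List (Int × Char)) : Int :=
  (l.map (fun p => if ¬ (p.2 = 'X' ∨ p.2 = 'x') ∧ (0 ≤ s + p.1 ∧ s + p.1 < (refL.length : Int) ∧ refL[(s + p.1).toNat]? = some p.2) then (1 : Int) else 0)).sum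

-- A's inner loop computes 2*matchCnt - k when the whole placement is in range
lemma pvScoreLoopA_eq (refL : List Char) (start : Int) (l : List Char) :
    ∀ (base acc : Int),
    (∀ p ∈ PySem.List.enumerate l base, 0 ≤ start + p.1 ∧ start + p.1 < (refL.length : Int)) →
    pvScoreLoopA refL start (PySem.List.enumerate l base) acc
      = acc + 2 * pvMatchCnt refL start (PySem.List.enumerate l base)
            - pvKOf (PySem.List.enumerate l base) := by
  induction l with
  | nil => intro base acc h; simp [PySem.List.enumerate_nil, pvScoreLoopA, pvMatchCnt, pvKOf]
  | cons c rest ih =>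
    intro base acc h
    rw [PySem.List.enumerate_cons] at *
    have hb := h (base, c) (by simp)
    simp only [pvScoreLoopA, pvMatchCnt, pvKOf, List.map_cons, List.sum_cons]
    have hguard : ¬ (start + base < 0 ∨ (refL.length : Int) ≤ start + base) := by omega
    rw [if_neg hguard]
    by_cases hx : c = 'X' ∨ c = 'x'
    · rw [if_pos hx, ih (base + 1) acc (fun p hp => h p (List.mem_cons_of_mem _ hp))]
      simp [pvMatchCnt, pvKOf, hx]
    · rw [if_neg hx, ih (base + 1) _ (fun p hp => h p (List.mem_cons_of_mem _ hp))]
      have hnx : ¬ (c = 'X' ∨ c = 'x') := hx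
      have hget : PySem.List.pyGetD refL (start + base) ' ' = refL[(start + base).toNat] :=
        PySem.List.pyGetD_eq_getElem refL ' ' hb.1 (by exact_mod_cast hb.2)
      have hhit : (¬ (c = 'X' ∨ c = 'x') ∧ (0 ≤ start + base ∧ start + base < (refL.length : Int) ∧ refL[(start + base).toNat]? = some c)) ↔ (c = PySem.List.pyGetD refL (start + base) ' ') := by
        constructor
        · rintro ⟨-, -, -, hsome⟩
          rw [hget]
          have : (start + base).toNat < refL.length := by omega
          simp [List.getElem?_eq_getElem this] at hsome
          exact hsome.symm
        · intro he
          refine ⟨hnx, hb.1, by exact_mod_cast hb.2, ?_⟩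
          have : (start + base).toNat < refL.length := by omega
          rw [List.getElem?_eq_getElem this, hget] at *
          exact congrArg some he.symm
      simp only [pvMatchCnt, pvKOf, if_pos hnx]
      by_cases hh : ¬ (c = 'X' ∨ c = 'x') ∧ (0 ≤ start + base ∧ start + base < (refL.length : Int) ∧ refL[(start + base).toNat]? = some c)
      · rw [if_pos hh, if_pos (hhit.mp hh)]; ring
      · rw [if_neg hh, if_neg (fun he => hh (hhit.mpr he))]; ring

lemma pvOccFold_getD (l : List (Int × Char)) :
    ∀ (d : PySem.Dict Char (List Int)) (c : Char),
    (l.foldl (fun d jc => d.modify jc.2 [] (fun l => l ++ [jc.1])) d).getD c []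
      = d.getD c [] ++ (l.filter (fun p => p.2 = c)).map (·.1) := by
  induction l with
  | nil => intro d c; simp
  | cons p rest ih =>
    intro d c
    simp only [List.foldl_cons, List.filter_cons, ih, PySem.Dict.getD_modify]
    by_cases hc : p.2 = c
    · simp [hc]
    · simp [hc, Ne.symm hc]

lemma pvOcc_mem (refL : List Char) (c : Char) (t : Int) :
    t ∈ (pvOcc refL).getD c [] ↔ (0 ≤ t ∧ t < (refL.length : Int) ∧ refL[t.toNat]? = some c) := by
  unfold pvOcc
  rw [pvOccFold_getD, PySem.Dict.getD_empty]
  simp only [List.nil_append, List.mem_map, List.mem_filter]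
  constructor
  · rintro ⟨p, ⟨hp, hpc⟩, rfl⟩
    rcases (PySem.List.mem_enumerate_iff refL 0 p).mp hp with ⟨k, hk, rfl⟩
    simp only [decide_eq_true_eq] at hpc
    refine ⟨by omega, by push_cast; omega, ?_⟩
    have h1 : ((0 : Int) + (k : Int)).toNat = k := by omega
    rw [h1, List.getElem?_eq_getElem hk, hpc]
  · rintro ⟨h0, h1, h2⟩
    have hk : t.toNat < refL.length := by omega
    refine ⟨((0 : Int) + (t.toNat : Int), refL[t.toNat]), ⟨?_, ?_⟩, by omega⟩
    · exact (PySem.List.mem_enumerate_iff refL 0 _).mpr ⟨t.toNat, hk, rfl⟩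
    · simp only [decide_eq_true_eq]
      rw [List.getElem?_eq_getElem hk] at h2
      exact Option.some.inj h2

lemma pvOcc_sorted (refL : List Char) (c : Char) :
    ((pvOcc refL).getD c []).Pairwise (· < ·) := by
  unfold pvOcc
  rw [pvOccFold_getD, PySem.Dict.getD_empty, List.nil_append]
  have h1 : (PySem.List.enumerate refL 0).Pairwise (fun p q => p.1 < q.1) :=
    PySem.List.pairwise_lt_enumerate refL 0
  have h2 := h1.filter (fun p => decide (p.2 = c))
  exact List.pairwise_map.mpr h2

lemma pvBisect_spec (L : List Int) (x : Int)
    (hs : ∀ (a b : Nat) (hab : a < b) (hb : b < L.length), L[a] < L[b]) :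
    ∀ (fuel : Nat) (lo hi : Int), (hi - lo).toNat ≤ fuel → 0 ≤ lo → lo ≤ hi → hi ≤ (L.length : Int) →
    (∀ (k : Nat) (hk : k < L.length), (k : Int) < lo → L[k] < x) →
    (∀ (k : Nat) (hk : k < L.length), hi ≤ (k : Int) → x ≤ L[k]) →
    (lo ≤ pvBisect L x lo hi ∧ pvBisect L x lo hi ≤ hi)
    ∧ (∀ (k : Nat) (hk : k < L.length), (k : Int) < pvBisect L x lo hi → L[k] < x)
    ∧ (∀ (k : Nat) (hk : k < L.length), pvBisect L x lo hi ≤ (k : Int) → x ≤ L[k]) := by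
  intro fuel
  induction fuel with
  | zero =>
    intro lo hi hf h0 hlh hhl hlow hhigh
    have : ¬ lo < hi := by omega
    rw [pvBisect, dif_neg this]
    exact ⟨⟨le_refl _, by omega⟩, hlow, fun k hk hge => hhigh k hk (by omega)⟩
  | succ f ih =>
    intro lo hi hf h0 hlh hhl hlow hhigh
    by_cases hlt : lo < hi
    · rw [pvBisect, dif_pos hlt]
      have hb := PySem.Int.floordiv_two_mid_bounds (le_of_lt hlt)
      set mid := PySem.Int.floordiv (lo + hi) 2 with hmid
      have hmidlt : mid < hi := by
        rw [hmid, PySem.Int.floordiv_lt_iff_lt_mul (by omega)]; omega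
      have hmidrange : mid.toNat < L.length := by omega
      have hgd : PySem.List.pyGetD L mid 0 = L[mid.toNat] :=
        PySem.List.pyGetD_eq_getElem L 0 (by omega) (by omega)
      by_cases hc : PySem.List.pyGetD L mid 0 < x
      · rw [if_pos hc]
        refine (ih (mid + 1) hi (by omega) (by omega) (by omega) hhl ?_ hhigh).imp
          (fun hr => ⟨by omega, hr.2⟩) id
        intro k hk hklt
        rcases lt_or_ge (k : Int) mid with hkm | hkm
        · have : k < mid.toNat := by omega
          calc L[k] < L[mid.toNat] := hs k mid.toNat this hmidrange
            _ < x := by rw [← hgd]; exact hc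
        · have : k = mid.toNat := by omega
          subst this
          rw [← hgd]; exact hc
      · rw [if_neg hc]
        refine (ih lo mid (by omega) (by omega) (by omega) (by omega) hlow ?_).imp
          (fun hr => ⟨hr.1, by omega⟩) id
        intro k hk hkge
        rcases lt_or_ge (mid.toNat : Int) (k : Int) with hkm | hkm
        · have h1 : mid.toNat < k := by omega
          have h2 : x ≤ L[mid.toNat] := by rw [← hgd]; omega
          exact le_of_lt (lt_of_le_of_lt h2 (hs mid.toNat k h1 hk))
        · have : k = mid.toNat := by omega
          subst this
          rw [← hgd]; omega
    · rw [pvBisect, dif_neg hlt]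
      exact ⟨⟨le_refl _, by omega⟩, hlow, fun k hk hge => hhigh k hk (by omega)⟩

lemma pvScan_length (width i : Int) (L : List Int) :
    ∀ (fuel : Nat) (lo : Int) (mt : List Int), ((L.length : Int) - lo).toNat ≤ fuel → 0 ≤ lo →
    (∀ (k : Nat) (hk : k < L.length), lo ≤ (k : Int) → i ≤ L[k]) →
    (pvScan width i L lo mt).length = mt.length := by
  intro fuel
  induction fuel with
  | zero =>
    intro lo mt hf h0 hge
    rw [pvScan, dif_neg (by omega)]
  | succ f ih =>
    intro lo mt hf h0 hge
    by_cases hc : lo < (L.length : Int) ∧ PySem.List.pyGetD L lo 0 - i < width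
    · rw [pvScan, dif_pos hc]
      rw [ih (lo + 1) _ (by omega) (by omega) (fun k hk hge' => hge k hk (by omega))]
      have hj : PySem.List.pyGetD L lo 0 = L[lo.toNat] :=
        PySem.List.pyGetD_eq_getElem L 0 h0 hc.1
      have hjge : i ≤ L[lo.toNat] := hge lo.toNat (by omega) (by omega)
      rw [PySem.List.pySetD_of_nonneg _ _ (by omega), List.length_set]
    · rw [pvScan, dif_neg hc]

lemma pvScan_getD (width i : Int) (L : List Int)
    (hs : ∀ (a b : Nat) (hab : a < b) (hb : b < L.length), L[a] < L[b]) :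
    ∀ (fuel : Nat) (lo : Int) (mt : List Int), ((L.length : Int) - lo).toNat ≤ fuel → 0 ≤ lo →
    width ≤ (mt.length : Int) →
    (∀ (k : Nat) (hk : k < L.length), lo ≤ (k : Int) → i ≤ L[k]) →
    ∀ (s : Nat), (s : Int) < width →
    (pvScan width i L lo mt).getD s 0
      = mt.getD s 0 + (if ((s : Int) + i) ∈ L.drop lo.toNat then 1 else 0) := by
  intro fuel
  induction fuel with
  | zero =>
    intro lo mt hf h0 hw hge s hsw
    rw [pvScan, dif_neg (by omega)]
    rw [List.drop_eq_nil_of_le (by omega)]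
    simp
  | succ f ih =>
    intro lo mt hf h0 hw hge s hsw
    by_cases hc : lo < (L.length : Int) ∧ PySem.List.pyGetD L lo 0 - i < width
    · rw [pvScan, dif_pos hc]
      have hlt : lo.toNat < L.length := by omega
      have hj : PySem.List.pyGetD L lo 0 = L[lo.toNat] :=
        PySem.List.pyGetD_eq_getElem L 0 h0 hc.1
      set j := L[lo.toNat] with hjdef
      have hjge : i ≤ j := hge lo.toNat hlt (by omega)
      have hjw : j - i < width := by rw [← hj]; exact hc.2
      set mt' := PySem.List.pySetD mt (PySem.List.pyGetD L lo 0 - i)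
        (PySem.List.pyGetD mt (PySem.List.pyGetD L lo 0 - i) 0 + 1) with hmt'
      have hlen' : mt'.length = mt.length := by
        rw [hmt', hj, PySem.List.pySetD_of_nonneg _ _ (by omega), List.length_set]
      have hrec := ih (lo + 1) mt' (by omega) (by omega) (by omega)
        (fun k hk hge' => hge k hk (by omega)) s hsw
      rw [hrec]
      have hdrop : L.drop lo.toNat = j :: L.drop (lo + 1).toNat := by
        have h1 : (lo + 1).toNat = lo.toNat + 1 := by omega
        rw [h1, hjdef, List.drop_eq_getElem_cons hlt]
      have hnotin : j ∉ L.drop (lo + 1).toNat := by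
        intro hmem
        rcases List.getElem_of_mem hmem with ⟨t, ht, hteq⟩
        rw [List.getElem_drop] at hteq
        have h1 : (lo + 1).toNat = lo.toNat + 1 := by omega
        have hld : (List.drop (lo + 1).toNat L).length = L.length - (lo + 1).toNat :=
          List.length_drop
        have := hs lo.toNat ((lo + 1).toNat + t) (by omega) (by omega)
        omega
      have hset : mt'.getD s 0 = mt.getD s 0 + (if ((s : Int) + i) = j then 1 else 0) := by
        rw [hmt', hj, PySem.List.pySetD_of_nonneg _ _ (by omega)]
        have hidx : (j - i).toNat < mt.length := by omega
        have hget : PySem.List.pyGetD mt (j - i) 0 = mt.getD (j - i).toNat 0 := by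
          rw [PySem.List.pyGetD_eq_getElem mt 0 (by omega) (by omega),
            List.getD_eq_getElem mt 0 hidx]
        simp only [List.getD, List.getElem?_set]
        by_cases he : (j - i).toNat = s
        · have hej : (s : Int) + i = j := by omega
          rw [if_pos he, if_pos hidx, if_pos hej]
          simp [hget, he]
        · have hej : ¬ ((s : Int) + i = j) := by omega
          rw [if_neg he, if_neg hej]
          simp
      rw [hset, hdrop]
      by_cases hm : ((s : Int) + i) = j
      · simp [hm, hnotin]
      · simp [hm, List.mem_cons]
    · rw [pvScan, dif_neg hc]
      have hzero : ((s : Int) + i) ∉ L.drop lo.toNat := by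
        intro hmem
        rcases List.getElem_of_mem hmem with ⟨t, ht, hteq⟩
        rw [List.getElem_drop] at hteq
        have hlend : (List.drop lo.toNat L).length = L.length - lo.toNat := List.length_drop
        by_cases hlo : lo < (L.length : Int)
        · have hcw : ¬ (PySem.List.pyGetD L lo 0 - i < width) := fun hcc => hc ⟨hlo, hcc⟩
          have hj : PySem.List.pyGetD L lo 0 = L[lo.toNat] :=
            PySem.List.pyGetD_eq_getElem L 0 h0 hlo
          rw [hj] at hcw
          -- L[lo.toNat] ≥ i + width; later elements are larger still; but s + i < i + width
          have hle : L[lo.toNat] ≤ L[lo.toNat + t] := by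
            rcases Nat.eq_zero_or_pos t with rfl | htpos
            · simp
            · exact le_of_lt (hs lo.toNat (lo.toNat + t) (by omega) (by omega))
          omega
        · omega
      simp [hzero]

lemma pvAccum_spec (refL : List Char) (width : Int) (l : List (Int × Char)) :
    ∀ (st : Int × List Int), width ≤ (st.2.length : Int) →
    (pvAccum width (pvOcc refL) l st).1 = st.1 + pvKOf l
    ∧ (pvAccum width (pvOcc refL) l st).2.length = st.2.length
    ∧ ∀ (s : Nat), (s : Int) < width →
        (pvAccum width (pvOcc refL) l st).2.getD s 0
          = st.2.getD s 0 + pvMatchCnt refL (s : Int) l := by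
  induction l with
  | nil => intro st _; simp [pvAccum, pvKOf, pvMatchCnt]
  | cons p rest ih =>
    intro st hlen
    simp only [pvAccum] at ih ⊢
    simp only [List.foldl_cons]
    by_cases hx : p.2 = 'X' ∨ p.2 = 'x'
    · rw [if_pos hx]
      obtain ⟨h1, h2, h3⟩ := ih st hlen
      refine ⟨?_, h2, fun s hs => ?_⟩
      · rw [h1]
        simp only [pvKOf, List.map_cons, List.sum_cons, if_neg (not_not_intro hx)]
        ring
      · rw [h3 s hs]
        simp only [pvMatchCnt, List.map_cons, List.sum_cons]
        rw [if_neg (fun hc => hc.1 hx)]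
        ring
    · rw [if_neg hx]
      have hnx : ¬ (p.2 = 'X' ∨ p.2 = 'x') := hx
      set L : List Int := (pvOcc refL).getD p.2 [] with hL
      have hsorted : L.Pairwise (· < ·) := pvOcc_sorted refL p.2
      have hs' : ∀ (a b : Nat) (hab : a < b) (hb : b < L.length), L[a] < L[b] :=
        fun a b hab hb => List.pairwise_iff_getElem.mp hsorted a b (by omega) hb hab
      have hblen : PySem.List.len L = (L.length : Int) := PySem.List.len_eq L
      obtain ⟨⟨hlo0, hlole⟩, hlow, hhigh⟩ :=
        pvBisect_spec L p.1 hs' L.length 0 (PySem.List.len L)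
          (by omega) le_rfl (by rw [hblen]; omega) (by rw [hblen])
          (fun k hk hneg => absurd hneg (by omega))
          (fun k hk hge => by rw [hblen] at hge; omega)
      set lo := pvBisect L p.1 0 (PySem.List.len L) with hlo
      rw [hblen] at hlole
      have hge : ∀ (k : Nat) (hk : k < L.length), lo ≤ (k : Int) → p.1 ≤ L[k] := hhigh
      set st' : Int × List Int := (st.1 + 1, pvScan width p.1 L lo st.2) with hst'
      have hlen' : st'.2.length = st.2.length :=
        pvScan_length width p.1 L L.length lo st.2 (by omega) (by omega) hge
      obtain ⟨h1, h2, h3⟩ := ih st' (by omega)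
      refine ⟨?_, by rw [h2, hlen'], fun s hs => ?_⟩
      · rw [h1]
        simp only [pvKOf, List.map_cons, List.sum_cons, hst']
        rw [if_pos hnx]
        ring
      rw [h3 s hs]
      have hsc := pvScan_getD width p.1 L hs' L.length lo st.2 (by omega) (by omega) hlen hge s hs
      have hdropmem : (((s : Int) + p.1) ∈ L.drop lo.toNat) ↔ (((s : Int) + p.1) ∈ L) := by
        constructor
        · exact fun hm => List.drop_subset _ _ hm
        · intro hm
          rcases List.getElem_of_mem hm with ⟨k, hk, hkeq⟩
          have hklo : lo ≤ (k : Int) := by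
            by_contra hkl
            have := hlow k hk (by omega)
            omega
          have hld : (List.drop lo.toNat L).length = L.length - lo.toNat := List.length_drop
          have hidx : k - lo.toNat < (List.drop lo.toNat L).length := by omega
          have : (List.drop lo.toNat L)[k - lo.toNat] = L[k] := by
            rw [List.getElem_drop]
            congr 1
            omega
          rw [← hkeq, ← this]
          exact List.getElem_mem hidx
      have hst2 : st'.2.getD s 0 = st.2.getD s 0 + (if ((s : Int) + p.1) ∈ L then 1 else 0) := by
        rw [hst']
        simp only [hsc, hdropmem]
      rw [hst2]
      simp only [pvMatchCnt, List.map_cons, List.sum_cons]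
      have hmem : (((s : Int) + p.1) ∈ L) ↔ (0 ≤ (s : Int) + p.1 ∧ (s : Int) + p.1 < (refL.length : Int) ∧ refL[((s : Int) + p.1).toNat]? = some p.2) :=
        pvOcc_mem refL p.2 _
      by_cases hh : (0 ≤ (s : Int) + p.1 ∧ (s : Int) + p.1 < (refL.length : Int) ∧ refL[((s : Int) + p.1).toNat]? = some p.2)
      · rw [if_pos (hmem.mpr hh), if_pos ⟨hnx, hh⟩]; ring
      · rw [if_neg (fun hm => hh (hmem.mp hm)), if_neg (fun hc => hh hc.2)]; ring

lemma pv_score_closed (refL fragL : List Char) (x : Int)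
    (hx0 : 0 ≤ x) (hxw : x < (refL.length : Int) - (fragL.length : Int) + 1) :
    pvScoreLoopA refL x (PySem.List.enumerate fragL 0) 0
      = 2 * (pvAccum ((refL.length : Int) - (fragL.length : Int) + 1) (pvOcc refL)
              (PySem.List.enumerate fragL 0)
              (0, List.replicate (max ((refL.length : Int) - (fragL.length : Int) + 1) 0).toNat 0)).2.getD x.toNat 0
        - (pvAccum ((refL.length : Int) - (fragL.length : Int) + 1) (pvOcc refL)
              (PySem.List.enumerate fragL 0)
              (0, List.replicate (max ((refL.length : Int) - (fragL.length : Int) + 1) 0).toNat 0)).1 := by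
  set W := (refL.length : Int) - (fragL.length : Int) + 1 with hWdef
  have hbounds : ∀ p ∈ PySem.List.enumerate fragL 0, 0 ≤ x + p.1 ∧ x + p.1 < (refL.length : Int) := by
    intro p hp
    rcases (PySem.List.mem_enumerate_iff fragL 0 p).mp hp with ⟨k, hk, rfl⟩
    have hkf : (k : Int) < (fragL.length : Int) := by exact_mod_cast hk
    exact ⟨by omega, by show x + (0 + (k : Int)) < _; omega⟩
  rw [pvScoreLoopA_eq refL x fragL 0 0 hbounds]
  have hlen0 : W ≤ ((List.replicate (max W 0).toNat (0 : Int)).length : Int) := by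
    rw [List.length_replicate]; omega
  obtain ⟨h1, h2, h3⟩ := pvAccum_spec refL W (PySem.List.enumerate fragL 0) ((0 : Int), List.replicate (max W 0).toNat (0 : Int)) hlen0
  have hxcast : ((x.toNat : Int)) = x := by omega
  have hgd := h3 x.toNat (by omega)
  rw [hxcast] at hgd
  rw [h1, hgd, List.getD_replicate _ (by omega)]
  ring

lemma pv_fold_eq (refL fragL : List Char) :
    (PySem.List.pyRange 0 ((refL.length : Int) - (fragL.length : Int) + 1) 1).foldl
      (fun (st : Int × Int) start =>
        let s := pvScoreLoopA refL start (PySem.List.enumerate fragL 0) 0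
        if s > st.2 then (start, s) else st) (0, -10000)
    = (PySem.List.pyRange 0 ((refL.length : Int) - (fragL.length : Int) + 1) 1).foldl
      (fun (st : Int × Int) s =>
        let sc := 2 * PySem.List.pyGetD
            (pvAccum ((refL.length : Int) - (fragL.length : Int) + 1) (pvOcc refL)
              (PySem.List.enumerate fragL 0)
              (0, List.replicate (max ((refL.length : Int) - (fragL.length : Int) + 1) 0).toNat 0)).2 s 0
          - (pvAccum ((refL.length : Int) - (fragL.length : Int) + 1) (pvOcc refL)
              (PySem.List.enumerate fragL 0)
              (0, List.replicate (max ((refL.length : Int) - (fragL.length : Int) + 1) 0).toNat 0)).1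
        if sc > st.2 then (s, sc) else st) (0, -10000) := by
  set W := (refL.length : Int) - (fragL.length : Int) + 1 with hWdef
  apply PySem.List.foldl_congr_mem
  intro acc x hx
  rcases (PySem.List.mem_pyRange_one).mp hx with ⟨hx0, hxw⟩
  have hkey := pv_score_closed refL fragL x hx0 hxw
  have hlen0 : W ≤ ((List.replicate (max W 0).toNat (0 : Int)).length : Int) := by
    rw [List.length_replicate]; omega
  obtain ⟨h1, h2, h3⟩ := pvAccum_spec refL W (PySem.List.enumerate fragL 0) ((0 : Int), List.replicate (max W 0).toNat (0 : Int)) hlen0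
  have hpy : PySem.List.pyGetD
      (pvAccum W (pvOcc refL) (PySem.List.enumerate fragL 0)
        (0, List.replicate (max W 0).toNat 0)).2 x 0
      = (pvAccum W (pvOcc refL) (PySem.List.enumerate fragL 0)
        (0, List.replicate (max W 0).toNat 0)).2.getD x.toNat 0 := by
    have hlt : x < ((pvAccum W (pvOcc refL) (PySem.List.enumerate fragL 0)
        (0, List.replicate (max W 0).toNat 0)).2.length : Int) := by
      rw [h2, List.length_replicate]; omega
    rw [PySem.List.pyGetD_eq_getElem _ _ hx0 hlt, List.getD_eq_getElem _ _ (by omega)]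
  simp only [hpy, hkey]
  rfl

-- ===== VERDICT (by name: the statement is the Claim_ definition above) =====
theorem best_alignment_to_reference_spec : Claim_equal_best_alignment_to_reference := by
  intro ref frag _
  simp only [Spec_best_alignment_to_reference, best_alignment_to_reference,
    best_alignment_to_reference_alt, score_alignment_at, PySem.Str.len_eq]
  rw [pv_fold_eq ref.toList frag.toList]
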